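-- pv_equiv track=rewrite | github.com/m-urkathar314/Music_Mood_Lifter | app.py | pre
-- ===== SOURCE A (Python) =====
-- from collections import Counter
--
-- def pre(l):
--
--
--     result = [item for items, c in Counter(l).most_common()
--               for item in [items] * c]
--
--     # Creating empty unique list
--     ul = []
--
--     for x in result:
--         if x not in ul:
--             ul.append(x)
--     return ul
-- ===== SOURCE B (Python) =====
-- def pre(l):
--     counts = {}
--     for x in l:
--         counts[x] = counts.get(x, 0) + 1
--     # dict iteration = first-seen order; stable sort by descending count keeps tie order
--     return sorted(counts, key=lambda x: -counts[x])
-- ===== Notes on version B (the rewrite author's own statement) =====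
-- stated objective: faster
-- what changed: Instead of expanding the counts back into a multiset and deduplicating it with a quadratic membership loop, B counts in one dict pass and stably sorts the distinct keys by descending count.
import Mathlib
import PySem

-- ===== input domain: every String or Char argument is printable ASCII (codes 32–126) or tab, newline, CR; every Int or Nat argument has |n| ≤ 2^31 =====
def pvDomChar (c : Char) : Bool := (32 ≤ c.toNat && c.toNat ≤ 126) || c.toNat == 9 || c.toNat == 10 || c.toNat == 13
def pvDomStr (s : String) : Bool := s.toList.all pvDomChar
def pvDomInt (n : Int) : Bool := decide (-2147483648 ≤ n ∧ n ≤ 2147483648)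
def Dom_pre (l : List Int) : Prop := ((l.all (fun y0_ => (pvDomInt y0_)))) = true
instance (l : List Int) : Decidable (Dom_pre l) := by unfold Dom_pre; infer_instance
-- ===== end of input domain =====

-- B replaces A's build-expand-dedup (quadratic membership loop) with count-then-stable-sort of the distinct keys.

-- ===== PORT A =====
-- Counter(l).most_common() = sorted(Counter(l).items(), key=itemgetter(1), reverse=True)  (stable, exact incl. tie order)
def pre (l : List Int) : List Int :=
  let mostCommon := PySem.List.sorted (PySem.Dict.counter l).items (fun p => p.2) true
  -- [item for items, c in mostCommon for item in [items] * c]  ([x]*c is empty for c ≤ 0, = replicate c.toNat)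
  let result := mostCommon.flatMap (fun p => List.replicate p.2.toNat p.1)
  -- ul = []; for x in result: if x not in ul: ul.append(x)
  result.foldl (fun ul x => if x ∈ ul then ul else ul ++ [x]) []

-- ===== PORT B =====
def pre_alt (l : List Int) : List Int :=
  let counts := l.foldl (fun d x => d.insert x (d.getD x 0 + 1)) PySem.Dict.empty
  PySem.List.sorted counts.keys (fun x => -(counts.getD x 0)) false

-- ===== PRECONDITION & SPEC =====
def Spec_pre (l : List Int) (out : List Int) : Prop := out = pre_alt l
instance (l : List Int) (out : List Int) : Decidable (Spec_pre l out) := by unfold Spec_pre; infer_instance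

-- ===== CLAIM (what is proved, stated in full; the proofs are below) =====
def Claim_equal_pre : Prop := ∀ (l : List Int), Dom_pre l → Spec_pre l (pre l)

-- ===== LEMMAS AND PROOFS =====

-- reverse=True with key p.2 is the same stable sort as reverse=False with the negated key
theorem sorted_rev_eq_sorted_neg {α : Type} (xs : List α) (key : α → Int) :
    PySem.List.sorted xs key true = PySem.List.sorted xs (fun x => -(key x)) false := by
  rw [PySem.List.sorted_rev_eq_foldl_insertBy, PySem.List.sorted_eq_foldl_insertBy]
  have : (fun (a b : α) => decide (key b < key a)) = (fun a b => decide (-(key a) < -(key b))) := by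
    funext a b; simp
  rw [this]

theorem insertBy_map {α β : Type} (g : α → β) (before : β → β → Bool) (x : α) (ys : List α) :
    (PySem.List.insertBy (fun a b => before (g a) (g b)) x ys).map g
      = PySem.List.insertBy before (g x) (ys.map g) := by
  induction ys with
  | nil => rfl
  | cons y t ih =>
      simp only [PySem.List.insertBy, List.map]
      by_cases h : before (g x) (g y)
      · simp [h]
      · simp [h, ih]

-- sorting through a key that factors over g commutes with mapping g
theorem sorted_map_factor {α β : Type} (xs : List α) (g : α → β) (key : β → Int) :
    (PySem.List.sorted xs (fun a => key (g a)) false).map g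
      = PySem.List.sorted (xs.map g) key false := by
  rw [PySem.List.sorted_eq_foldl_insertBy, PySem.List.sorted_eq_foldl_insertBy]
  induction xs using List.reverseRecOn with
  | nil => rfl
  | append_singleton t x ih =>
      simp only [List.map_append, List.foldl_append, List.foldl_cons, List.foldl_nil, List.map, ← ih]
      exact insertBy_map g (fun a b => decide (key a < key b)) x _

theorem dedup_replicate {α : Type} [DecidableEq α] (acc : List α) (x : α) (n : Nat) (hx : x ∈ acc) :
    List.foldl (fun ul y => if y ∈ ul then ul else ul ++ [y]) acc (List.replicate n x) = acc := by
  induction n with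
  | zero => rfl
  | succ m ih => simp [List.replicate, hx, ih]

-- deduplicating the expansion of distinct-key positive-count blocks yields the keys
theorem dedup_flat_blocks (ps : List (Int × Int)) (acc : List Int)
    (hnd : (ps.map Prod.fst).Nodup) (hpos : ∀ p ∈ ps, 1 ≤ p.2) (hdis : ∀ p ∈ ps, p.1 ∉ acc) :
    List.foldl (fun ul x => if x ∈ ul then ul else ul ++ [x])
        acc (ps.flatMap (fun p => List.replicate p.2.toNat p.1))
      = acc ++ ps.map Prod.fst := by
  induction ps generalizing acc with
  | nil => simp
  | cons p t ih =>
      have h1 : 1 ≤ p.2 := hpos p (by simp)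
      have hrep : List.replicate p.2.toNat p.1 = p.1 :: List.replicate (p.2.toNat - 1) p.1 := by
        have : p.2.toNat = (p.2.toNat - 1) + 1 := by omega
        rw [this]; rfl
      have hpa : p.1 ∉ acc := hdis p (by simp)
      simp only [List.flatMap_cons, List.foldl_append, hrep, List.foldl_cons, if_neg hpa]
      rw [dedup_replicate (acc ++ [p.1]) p.1 _ (by simp)]
      rw [ih (acc ++ [p.1])]
      · simp
      · exact (List.nodup_cons.mp hnd).2
      · exact fun q hq => hpos q (by simp [hq])
      · intro q hq
        have hne : q.1 ≠ p.1 := by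
          intro h
          exact (List.nodup_cons.mp hnd).1 (h ▸ List.mem_map_of_mem hq)
        simp [hdis q (by simp [hq]), hne]

-- ===== VERDICT (by name: the statement is the Claim_ definition above) =====
theorem pre_spec : Claim_equal_pre := by
  intro l _
  show pre l = pre_alt l
  simp only [pre, pre_alt]
  rw [PySem.Dict.foldl_insert_getD_add_one_eq_counter, PySem.Dict.keys_counter]
  have hkey : (fun x : Int => -((PySem.Dict.counter l).getD x 0))
      = (fun x : Int => -((l.count x : Int))) := by
    funext x; rw [PySem.Dict.getD_counter]
  rw [hkey, sorted_rev_eq_sorted_neg, PySem.Dict.items_counter]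
  set S := PySem.Set.ofList l with hS
  set g : Int → Int × Int := fun k => (k, (l.count k : Int)) with hg
  have hfac := sorted_map_factor S g (fun p : Int × Int => -p.2)
  set srt := PySem.List.sorted (S.map g) (fun p : Int × Int => -p.2) false with hsrt
  have hnd : (srt.map Prod.fst).Nodup := by
    have hperm : (srt.map Prod.fst).Perm ((S.map g).map Prod.fst) :=
      (PySem.List.sorted_perm _ _ _).map Prod.fst
    have hSnd : ((S.map g).map Prod.fst).Nodup := by
      have : (S.map g).map Prod.fst = S := by simp [hg, Function.comp_def]
      rw [this, hS]; exact PySem.Set.nodup_ofList l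
    exact hperm.nodup_iff.mpr hSnd
  have hpos : ∀ p ∈ srt, 1 ≤ p.2 := by
    intro p hp
    rw [hsrt, PySem.List.mem_sorted] at hp
    obtain ⟨k, hk, rfl⟩ := List.mem_map.mp hp
    have hkl : k ∈ l := by
      have hmem := PySem.Set.mem_ofList (xs := l) (y := k)
      rw [← hS] at hmem
      exact hmem.mp hk
    have h0 : 0 < l.count k := List.count_pos_iff.mpr hkl
    show (1 : Int) ≤ (l.count k : Int)
    exact_mod_cast h0
  rw [dedup_flat_blocks srt [] hnd hpos (by simp)]
  have hfin : srt.map Prod.fst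
      = PySem.List.sorted S (fun x : Int => -((l.count x : Int))) false := by
    rw [← hfac]
    simp [hg, Function.comp_def]
  simpa using hfin
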